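-- pv_equiv track=rewrite | github.com/MathPlayer/advent-of-code-solved | 2020/11.py | part_1_step
-- ===== SOURCE A (Python) =====
-- from copy import deepcopy
--
-- FLOOR = '.'
--
-- EMPTY = 'L'
--
-- OCCUPIED = '#'
--
-- DIRECTIONS = tuple((x, y) for x in range(-1, 2) for y in range(-1, 2) if x or y)
--
-- def part_1_step(data):
--     new_data = deepcopy(data)
--     width = len(data[0])
--     height = len(data)
--
--     for y in range(height):
--         for x in range(width):
--             if data[y][x] == FLOOR:
--                 continue
--             count = 0
--             neigh = 0
--             for i, j in DIRECTIONS: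
--                 if x + i < 0 or x + i >= width:
--                     continue
--                 if y + j < 0 or y + j >= height:
--                     continue
--                 neigh += 1
--                 if data[y][x] == EMPTY and data[y + j][x + i] != OCCUPIED:
--                     count += 1
--                 if data[y][x] == OCCUPIED and data[y + j][x + i] == OCCUPIED:
--                     count += 1
--             if data[y][x] == EMPTY and count == neigh:
--                 new_data[y][x] = OCCUPIED
--             if data[y][x] == OCCUPIED and count >= 4:
--                 new_data[y][x] = EMPTY
--     return new_data
-- ===== SOURCE B (Python) =====
-- FLOOR = '.'
-- EMPTY = 'L'
-- OCCUPIED = '#'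
--
-- def part_1_step(data):
--     height = len(data)
--     width = len(data[0])
--     # scatter pass: each occupied cell increments all in-bounds neighbors
--     counts = [[0] * width for _ in range(height)]
--     for y in range(height):
--         for x in range(width):
--             if data[y][x] == OCCUPIED:
--                 for ny in range(max(0, y - 1), min(height, y + 2)):
--                     for nx in range(max(0, x - 1), min(width, x + 2)):
--                         if (ny, nx) != (y, x):
--                             counts[ny][nx] += 1
--     # build pass
--     out = []
--     for y in range(height):
--         row = list(data[y])
--         for x in range(width):
--             c = data[y][x]
--             if c == EMPTY and counts[y][x] == 0:
--                 row[x] = OCCUPIED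
--             elif c == OCCUPIED and counts[y][x] >= 4:
--                 row[x] = EMPTY
--         out.append(row)
--     return out
-- ===== Notes on version B (the rewrite author's own statement) =====
-- stated objective: alternative
-- what changed: Replaced the per-cell 8-direction gather (count/neigh inner loop with bounds checks) by a two-pass scatter: a zeroed count grid is built by letting every occupied cell increment its in-bounds neighbors, then a second pass builds the output from each cell and its count.
import Mathlib
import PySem

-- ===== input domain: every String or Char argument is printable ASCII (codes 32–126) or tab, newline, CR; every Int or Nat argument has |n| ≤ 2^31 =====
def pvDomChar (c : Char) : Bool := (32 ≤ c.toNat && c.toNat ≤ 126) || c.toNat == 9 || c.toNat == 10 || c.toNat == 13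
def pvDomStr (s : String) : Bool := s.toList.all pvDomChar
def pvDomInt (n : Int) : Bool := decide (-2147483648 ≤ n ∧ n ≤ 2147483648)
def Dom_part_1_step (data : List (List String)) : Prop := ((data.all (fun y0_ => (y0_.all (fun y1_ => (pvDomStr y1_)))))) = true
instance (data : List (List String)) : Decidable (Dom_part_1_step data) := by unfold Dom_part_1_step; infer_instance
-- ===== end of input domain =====

-- B replaces A's per-cell 8-direction gather by a two-pass scatter (occupied cells
-- increment a neighbor-count grid, then a second pass rebuilds the grid from the counts);
-- same cost, alternative algorithm.  Python A returns a fresh grid (deepcopy), so only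
-- return values are at stake.

-- ===== PORT A =====
-- height / width as Python computes them (len(data), len(data[0]))
def pvH (data : List (List String)) : Int := data.length
def pvW (data : List (List String)) : Int := (PySem.List.pyGetD data 0 []).length
-- data[y][x]; exact under Pre_ (both indices in range at every use)
def pvCell (data : List (List String)) (y x : Int) : String :=
  PySem.List.pyGetD (PySem.List.pyGetD data y []) x ""
-- DIRECTIONS, in Python's generation order
def pvDirs : List (Int × Int) := [(-1,-1),(-1,0),(-1,1),(0,-1),(0,1),(1,-1),(1,0),(1,1)]
-- g[y][x] = v; exact for the in-range nonneg indices used under Pre_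
def pvSetCell (g : List (List String)) (y x : Int) (v : String) : List (List String) :=
  g.set y.toNat ((PySem.List.pyGetD g y []).set x.toNat v)
-- the inner DIRECTIONS loop body of A: state (count, neigh)
def pvCN (data : List (List String)) (y x : Int) (cn : Int × Int) (d : Int × Int) : Int × Int :=
  if x + d.1 < 0 ∨ x + d.1 ≥ pvW data then cn
  else if y + d.2 < 0 ∨ y + d.2 ≥ pvH data then cn
  else
    let neigh := cn.2 + 1
    let c1 := if pvCell data y x = "L" ∧ ¬ (pvCell data (y + d.2) (x + d.1) = "#") then cn.1 + 1 else cn.1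
    let c2 := if pvCell data y x = "#" ∧ pvCell data (y + d.2) (x + d.1) = "#" then c1 + 1 else c1
    (c2, neigh)
-- one iteration of A's per-cell body
def pvStepA (data : List (List String)) (nd : List (List String)) (y x : Int) : List (List String) :=
  if pvCell data y x = "." then nd
  else
    let cn := pvDirs.foldl (pvCN data y x) (0, 0)
    let nd1 := if pvCell data y x = "L" ∧ cn.1 = cn.2 then pvSetCell nd y x "#" else nd
    if pvCell data y x = "#" ∧ 4 ≤ cn.1 then pvSetCell nd1 y x "L" else nd1

def part_1_step (data : List (List String)) : List (List String) :=
  (PySem.List.pyRange 0 (pvH data) 1).foldl (fun nd y =>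
    (PySem.List.pyRange 0 (pvW data) 1).foldl (fun nd x => pvStepA data nd y x) nd) data

-- ===== PORT B =====
-- counts[y][x] with default 0 (all reads in range)
def pvCnt (g : List (List Int)) (y x : Int) : Int :=
  PySem.List.pyGetD (PySem.List.pyGetD g y []) x 0
-- counts[y][x] += 1
def pvInc (g : List (List Int)) (y x : Int) : List (List Int) :=
  g.set y.toNat ((PySem.List.pyGetD g y []).set x.toNat
    (PySem.List.pyGetD (PySem.List.pyGetD g y []) x 0 + 1))

def part_1_step_alt (data : List (List String)) : List (List String) :=
  let counts0 : List (List Int) :=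
    List.replicate (pvH data).toNat (List.replicate (pvW data).toNat 0)
  -- scatter pass: every occupied cell increments its in-bounds neighbors
  let counts := (PySem.List.pyRange 0 (pvH data) 1).foldl (fun g y =>
    (PySem.List.pyRange 0 (pvW data) 1).foldl (fun g x =>
      if pvCell data y x = "#" then
        (PySem.List.pyRange (max 0 (y-1)) (min (pvH data) (y+2)) 1).foldl (fun g ny =>
          (PySem.List.pyRange (max 0 (x-1)) (min (pvW data) (x+2)) 1).foldl (fun g nx =>
            if (ny, nx) ≠ (y, x) then pvInc g ny nx else g) g) g
      else g) g) counts0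
  -- build pass
  (PySem.List.pyRange 0 (pvH data) 1).foldl (fun out y =>
    let row := (PySem.List.pyRange 0 (pvW data) 1).foldl (fun r x =>
      if pvCell data y x = "L" ∧ pvCnt counts y x = 0 then r.set x.toNat "#"
      else if pvCell data y x = "#" ∧ 4 ≤ pvCnt counts y x then r.set x.toNat "L"
      else r) (PySem.List.pyGetD data y [])
    out ++ [row]) []

-- ===== PRECONDITION & SPEC =====
-- Pre_ excludes exactly the inputs where Python A raises IndexError: the empty grid
-- (len(data[0])), and grids where some row is shorter than the first row (data[y][x]).
def Pre_part_1_step (data : List (List String)) : Prop :=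
  data ≠ [] ∧ ∀ row ∈ data, (PySem.List.pyGetD data 0 []).length ≤ row.length
instance (data : List (List String)) : Decidable (Pre_part_1_step data) := by
  unfold Pre_part_1_step; infer_instance
def pvWitness_part_1_step : List (List String) := [["L", "#"], [".", "L"]]
def Spec_part_1_step (data : List (List String)) (out : List (List String)) : Prop := out = part_1_step_alt data
instance (data : List (List String)) (out : List (List String)) : Decidable (Spec_part_1_step data out) := by unfold Spec_part_1_step; infer_instance

-- ===== CLAIM (what is proved, stated in full; the proofs are below) =====
def Claim_equal_part_1_step : Prop := ∀ (data : List (List String)), Dom_part_1_step data → Pre_part_1_step data → Spec_part_1_step data (part_1_step data)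

-- ===== LEMMAS AND PROOFS =====

-- the common spec: occupied-neighbor count by the 8 directions
def pvOccB (data : List (List String)) (y x : Int) : Bool :=
  decide (0 ≤ x ∧ x < pvW data ∧ 0 ≤ y ∧ y < pvH data) && decide (pvCell data y x = "#")
def occA (data : List (List String)) (y x : Int) : Int :=
  (pvDirs.countP (fun d => pvOccB data (y + d.2) (x + d.1)) : Nat)
abbrev pvTrig (data : List (List String)) (y x : Int) : Prop :=
  (pvCell data y x = "L" ∧ occA data y x = 0) ∨ (pvCell data y x = "#" ∧ 4 ≤ occA data y x)
def pvNew (data : List (List String)) (y x : Int) : String :=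
  if pvCell data y x = "L" then "#" else "L"
-- list of all (y,x) pairs of a rectangle, row major
def pvPairs (a b c d : Int) : List (Int × Int) :=
  (PySem.List.pyRange a b 1).flatMap (fun y => (PySem.List.pyRange c d 1).map (fun x => (y, x)))

lemma mem_pvPairs (a b c d : Int) (p : Int × Int) :
    p ∈ pvPairs a b c d ↔ a ≤ p.1 ∧ p.1 < b ∧ c ≤ p.2 ∧ p.2 < d := by
  cases p with
  | mk py px =>
    simp only [pvPairs, List.mem_flatMap, List.mem_map, PySem.List.mem_pyRange_one, Prod.mk.injEq]
    constructor
    · rintro ⟨y, hy, x, hx, h1, h2⟩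
      subst h1; subst h2; exact ⟨hy.1, hy.2, hx.1, hx.2⟩
    · rintro ⟨h1, h2, h3, h4⟩
      exact ⟨py, ⟨h1, h2⟩, px, ⟨h3, h4⟩, rfl, rfl⟩

lemma nodup_pvPairs (a b c d : Int) : (pvPairs a b c d).Nodup := by
  rw [pvPairs, List.nodup_flatMap]
  constructor
  · intro y _
    exact (PySem.List.nodup_pyRange_one c d).map_on (fun x _ x' _ h => by
      simpa using congrArg Prod.snd h)
  · refine (PySem.List.nodup_pyRange_one a b).imp ?_
    intro y y' hne q hq hq'
    simp only [List.mem_map] at hq hq'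
    obtain ⟨x, _, rfl⟩ := hq
    obtain ⟨x', _, h⟩ := hq'
    exact hne (by simpa using (congrArg Prod.fst h).symm)

lemma foldl_foldl_flatMap {α β γ : Type} (l : List β) (f : β → List γ)
    (step : α → γ → α) (init : α) :
    l.foldl (fun a y => (f y).foldl step a) init = (l.flatMap f).foldl step init := by
  induction l generalizing init with
  | nil => rfl
  | cons y l ih => simp [List.flatMap_cons, List.foldl_append, ih]

-- Bool counting: countP (p && q) + countP (p && !q) = countP p
lemma countP_and_split {α : Type} (L : List α) (p q : α → Bool) :
    L.countP (fun a => p a && q a) + L.countP (fun a => p a && !q a) = L.countP p := by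
  induction L with
  | nil => rfl
  | cons a L ih =>
    simp only [List.countP_cons]
    cases hp : p a <;> cases hq : q a <;> simp <;> omega

-- countP of "equals c and q" = count of c, if q c
lemma countP_eq_count {α : Type} [DecidableEq α] (L : List α) (c : α) (q : α → Prop)
    [DecidablePred q] :
    L.countP (fun a => decide (a = c ∧ q a)) = if q c then L.countP (fun a => decide (a = c)) else 0 := by
  induction L with
  | nil => simp
  | cons a L ih =>
    simp only [List.countP_cons, ih]
    by_cases hq : q c <;> by_cases hac : a = c <;> simp [hq, hac] <;> try omega

lemma countP_nodup_mem {α : Type} [DecidableEq α] (L : List α) (c : α) (hnd : L.Nodup) :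
    L.countP (fun a => decide (a = c)) = if c ∈ L then 1 else 0 := by
  induction L with
  | nil => simp
  | cons a L ih =>
    rcases List.nodup_cons.mp hnd with ⟨hna, hnd'⟩
    simp only [List.countP_cons, ih hnd', List.mem_cons]
    by_cases hac : a = c
    · subst hac
      simp [hna]
    · have : ¬ c = a := fun h => hac h.symm
      simp [hac, this]

-- A's inner DIRECTIONS fold, characterized
lemma innerA (data : List (List String)) (y x : Int) (ds : List (Int × Int)) (c0 n0 : Int) :
    ds.foldl (pvCN data y x) (c0, n0) =
      (c0 + (if pvCell data y x = "L"
             then (ds.countP (fun d => (decide (0 ≤ x + d.1 ∧ x + d.1 < pvW data ∧ 0 ≤ y + d.2 ∧ y + d.2 < pvH data)) && !decide (pvCell data (y + d.2) (x + d.1) = "#")) : Nat)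
             else if pvCell data y x = "#"
             then (ds.countP (fun d => pvOccB data (y + d.2) (x + d.1)) : Nat)
             else 0),
       n0 + (ds.countP (fun d => decide (0 ≤ x + d.1 ∧ x + d.1 < pvW data ∧ 0 ≤ y + d.2 ∧ y + d.2 < pvH data)) : Nat)) := by
  induction ds generalizing c0 n0 with
  | nil => simp
  | cons d ds ih =>
    rw [List.foldl_cons]
    by_cases hxb : x + d.1 < 0 ∨ x + d.1 ≥ pvW data
    · have hinb : ¬(0 ≤ x + d.1 ∧ x + d.1 < pvW data ∧ 0 ≤ y + d.2 ∧ y + d.2 < pvH data) := by omega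
      rw [show pvCN data y x (c0, n0) d = (c0, n0) from by simp [pvCN, hxb]]
      rw [ih]
      simp only [List.countP_cons, pvOccB, hinb, decide_false, Bool.false_and, if_neg,
        Bool.false_eq_true, not_false_eq_true, Nat.add_zero]
    · by_cases hyb : y + d.2 < 0 ∨ y + d.2 ≥ pvH data
      · have hinb : ¬(0 ≤ x + d.1 ∧ x + d.1 < pvW data ∧ 0 ≤ y + d.2 ∧ y + d.2 < pvH data) := by omega
        rw [show pvCN data y x (c0, n0) d = (c0, n0) from by simp [pvCN, hxb, hyb]]
        rw [ih]
        simp only [List.countP_cons, pvOccB, hinb, decide_false, Bool.false_and, if_neg,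
          Bool.false_eq_true, not_false_eq_true, Nat.add_zero]
      · have hinb : (0 ≤ x + d.1 ∧ x + d.1 < pvW data ∧ 0 ≤ y + d.2 ∧ y + d.2 < pvH data) := by omega
        rw [show pvCN data y x (c0, n0) d =
            ((if pvCell data y x = "#" ∧ pvCell data (y + d.2) (x + d.1) = "#"
              then (if pvCell data y x = "L" ∧ ¬ (pvCell data (y + d.2) (x + d.1) = "#") then c0 + 1 else c0) + 1
              else (if pvCell data y x = "L" ∧ ¬ (pvCell data (y + d.2) (x + d.1) = "#") then c0 + 1 else c0)),
             n0 + 1) from by simp [pvCN, hxb, hyb]]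
        rw [ih]
        simp [List.countP_cons, pvOccB, hinb, Prod.mk.injEq]
        constructor
        · by_cases hL : pvCell data y x = "L" <;>
            by_cases hH : pvCell data y x = "#" <;>
            by_cases hocc : pvCell data (y + d.2) (x + d.1) = "#" <;>
            simp [hL, hH, hocc] <;> first | omega | (exfalso; rw [hL] at hH; exact absurd hH (by decide))
        · push_cast; omega

-- one step of A is a conditional write of the spec value
lemma stepA_eq (data nd : List (List String)) (y x : Int) :
    pvStepA data nd y x =
      if pvTrig data y x then pvSetCell nd y x (pvNew data y x) else nd := by
  unfold pvStepA
  rw [innerA]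
  by_cases hF : pvCell data y x = "."
  · have hL : ¬ pvCell data y x = "L" := by rw [hF]; decide
    have hH : ¬ pvCell data y x = "#" := by rw [hF]; decide
    rw [if_pos hF, if_neg (by simp [pvTrig, hL, hH])]
  · rw [if_neg hF]
    dsimp only
    set K : Int := ((pvDirs.countP (fun d => (decide (0 ≤ x + d.1 ∧ x + d.1 < pvW data ∧ 0 ≤ y + d.2 ∧ y + d.2 < pvH data)) && !decide (pvCell data (y + d.2) (x + d.1) = "#")) : Nat) : Int) with hK
    set O : Int := ((pvDirs.countP (fun d => pvOccB data (y + d.2) (x + d.1)) : Nat) : Int) with hO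
    set N : Int := ((pvDirs.countP (fun d => decide (0 ≤ x + d.1 ∧ x + d.1 < pvW data ∧ 0 ≤ y + d.2 ∧ y + d.2 < pvH data)) : Nat) : Int) with hN
    have hKON : K + O = N := by
      have hco : pvDirs.countP (fun d => pvOccB data (y + d.2) (x + d.1))
          = pvDirs.countP (fun d => (decide (0 ≤ x + d.1 ∧ x + d.1 < pvW data ∧ 0 ≤ y + d.2 ∧ y + d.2 < pvH data)) && decide (pvCell data (y + d.2) (x + d.1) = "#")) := by
        apply List.countP_congr
        intro a _
        simp [pvOccB]
      have hsplit := countP_and_split pvDirs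
        (fun d => decide (0 ≤ x + d.1 ∧ x + d.1 < pvW data ∧ 0 ≤ y + d.2 ∧ y + d.2 < pvH data))
        (fun d => decide (pvCell data (y + d.2) (x + d.1) = "#"))
      rw [hK, hO, hN, hco]
      omega
    have hO0 : (0:Int) ≤ O := by rw [hO]; positivity
    have hoccA : occA data y x = O := by rw [hO, occA]
    simp only [zero_add]
    by_cases hL : pvCell data y x = "L"
    · have hH : ¬ pvCell data y x = "#" := by rw [hL]; decide
      rw [if_pos hL]
      rw [if_neg (show ¬(pvCell data y x = "#" ∧ 4 ≤ K) from fun h => hH h.1)]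
      by_cases hc : K = N
      · have htrig : pvTrig data y x := Or.inl ⟨hL, by rw [hoccA]; omega⟩
        rw [if_pos ⟨hL, hc⟩, if_pos htrig, show pvNew data y x = "#" from by rw [pvNew, if_pos hL]]
      · have htrig : ¬ pvTrig data y x := by
          intro h
          rcases h with ⟨_, h0⟩ | ⟨hh, _⟩
          · rw [hoccA] at h0; omega
          · exact hH hh
        rw [if_neg (show ¬(pvCell data y x = "L" ∧ K = N) from fun h => hc h.2), if_neg htrig]
    · by_cases hH : pvCell data y x = "#"
      · rw [if_neg hL, if_pos hH]
        rw [if_neg (show ¬(pvCell data y x = "L" ∧ O = N) from fun h => hL h.1)]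
        by_cases hc : 4 ≤ O
        · rw [if_pos ⟨hH, hc⟩, if_pos (Or.inr ⟨hH, by rw [hoccA]; omega⟩),
            show pvNew data y x = "L" from by rw [pvNew, if_neg hL]]
        · have htrig : ¬ pvTrig data y x := by
            intro h
            rcases h with ⟨hh, _⟩ | ⟨_, h4⟩
            · exact hL hh
            · rw [hoccA] at h4; exact hc h4
          rw [if_neg (show ¬(pvCell data y x = "#" ∧ 4 ≤ O) from fun h => hc h.2), if_neg htrig]
      · rw [if_neg hL, if_neg hH]
        rw [if_neg (show ¬(pvCell data y x = "L" ∧ ((0:ℕ):ℤ) = N) from fun h => hL h.1)]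
        rw [if_neg (show ¬(pvCell data y x = "#" ∧ (4:ℤ) ≤ ((0:ℕ):ℤ)) from fun h => hH h.1)]
        rw [if_neg (show ¬ pvTrig data y x from by
          intro h
          rcases h with ⟨hh, _⟩ | ⟨hh, _⟩
          · exact hL hh
          · exact hH hh)]

-- generic double-indexed read-after-write
lemma pyGetD2_set {α : Type} (g : List (List α)) (dflt : α) (y x : Int) (v : α)
    (y' x' : Int) (hy : 0 ≤ y) (hx : 0 ≤ x) (hy' : 0 ≤ y') (hx' : 0 ≤ x')
    (hyl : y.toNat < g.length) (hxl : x.toNat < (PySem.List.pyGetD g y []).length) :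
    PySem.List.pyGetD (PySem.List.pyGetD (g.set y.toNat ((PySem.List.pyGetD g y []).set x.toNat v)) y' []) x' dflt
      = if y' = y ∧ x' = x then v else PySem.List.pyGetD (PySem.List.pyGetD g y' []) x' dflt := by
  obtain ⟨ny, rfl⟩ : ∃ n : ℕ, y = (n : Int) := ⟨y.toNat, by omega⟩
  obtain ⟨nx, rfl⟩ : ∃ n : ℕ, x = (n : Int) := ⟨x.toNat, by omega⟩
  obtain ⟨ny', rfl⟩ : ∃ n : ℕ, y' = (n : Int) := ⟨y'.toNat, by omega⟩
  obtain ⟨nx', rfl⟩ : ∃ n : ℕ, x' = (n : Int) := ⟨x'.toNat, by omega⟩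
  simp only [PySem.List.pyGetD_natCast, Int.toNat_natCast] at *
  simp only [List.getD_eq_getElem?_getD, List.getElem?_set, Nat.cast_inj]
  by_cases h1 : ny = ny'
  · subst h1
    have hg : g[ny]? = some g[ny] := List.getElem?_eq_getElem hyl
    have hrow : g.getD ny [] = g[ny] := List.getD_eq_getElem g [] hyl
    rw [hrow] at hxl
    by_cases h2 : nx = nx'
    · subst h2
      simp [hyl, hg, hrow, List.getElem?_set, hxl]
    · simp [hyl, hg, hrow, List.getElem?_set, h2]
      intro h
      exact absurd h.symm h2
  · simp [h1]
    intro h _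
    exact absurd h.symm h1

lemma rowlen_set2 {α : Type} (g : List (List α)) (y : Int) (r : List α) (hy : 0 ≤ y)
    (hr : r.length = (PySem.List.pyGetD g y []).length) (i : Int) (hi : 0 ≤ i) :
    (PySem.List.pyGetD (g.set y.toNat r) i []).length = (PySem.List.pyGetD g i []).length := by
  obtain ⟨ny, rfl⟩ : ∃ n : ℕ, y = (n : Int) := ⟨y.toNat, by omega⟩
  obtain ⟨ni, rfl⟩ : ∃ n : ℕ, i = (n : Int) := ⟨i.toNat, by omega⟩
  simp only [PySem.List.pyGetD_natCast, Int.toNat_natCast] at *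
  simp only [List.getD_eq_getElem?_getD, List.getElem?_set]
  by_cases h1 : ny = ni
  · subst h1
    by_cases h2 : ny < g.length
    · simp [h2, hr, List.getD_eq_getElem?_getD, List.getElem?_eq_getElem h2,
        List.getD_eq_getElem g [] h2]
    · simp [h2, List.getElem?_eq_none (by omega : g.length ≤ ny)]
  · simp [h1]

lemma cell_setCell (g : List (List String)) (y x : Int) (v : String) (y' x' : Int)
    (hy : 0 ≤ y) (hx : 0 ≤ x) (hy' : 0 ≤ y') (hx' : 0 ≤ x')
    (hyl : y.toNat < g.length) (hxl : x.toNat < (PySem.List.pyGetD g y []).length) :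
    pvCell (pvSetCell g y x v) y' x' = if y' = y ∧ x' = x then v else pvCell g y' x' :=
  pyGetD2_set g "" y x v y' x' hy hx hy' hx' hyl hxl

lemma cnt_inc (g : List (List Int)) (y x : Int) (y' x' : Int)
    (hy : 0 ≤ y) (hx : 0 ≤ x) (hy' : 0 ≤ y') (hx' : 0 ≤ x')
    (hyl : y.toNat < g.length) (hxl : x.toNat < (PySem.List.pyGetD g y []).length) :
    pvCnt (pvInc g y x) y' x' =
      if y' = y ∧ x' = x then pvCnt g y x + 1 else pvCnt g y' x' :=
  pyGetD2_set g 0 y x _ y' x' hy hx hy' hx' hyl hxl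

-- A's whole grid fold, characterized cell-wise
lemma foldA (data : List (List String)) (L : List (Int × Int))
    (hL : ∀ p ∈ L, 0 ≤ p.1 ∧ p.1.toNat < data.length ∧ 0 ≤ p.2 ∧
            p.2.toNat < (PySem.List.pyGetD data p.1 []).length)
    (nd : List (List String)) (hlen : nd.length = data.length)
    (hrow : ∀ i : Int, 0 ≤ i → (PySem.List.pyGetD nd i []).length = (PySem.List.pyGetD data i []).length)
    (y' x' : Int) (h0 : 0 ≤ y') (h1 : 0 ≤ x') :
    pvCell (L.foldl (fun nd p => pvStepA data nd p.1 p.2) nd) y' x' =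
      if (y', x') ∈ L ∧ pvTrig data y' x' then pvNew data y' x' else pvCell nd y' x' := by
  induction L generalizing nd with
  | nil => simp
  | cons p L ih =>
    rw [List.foldl_cons, stepA_eq]
    have hp := hL p List.mem_cons_self
    have hyl : p.1.toNat < nd.length := by rw [hlen]; exact hp.2.1
    have hxl : p.2.toNat < (PySem.List.pyGetD nd p.1 []).length := by
      rw [hrow p.1 hp.1]; exact hp.2.2.2
    by_cases ht : pvTrig data p.1 p.2
    · rw [if_pos ht]
      have hlen' : (pvSetCell nd p.1 p.2 (pvNew data p.1 p.2)).length = data.length := by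
        rw [pvSetCell, List.length_set, hlen]
      have hrow' : ∀ i : Int, 0 ≤ i →
          (PySem.List.pyGetD (pvSetCell nd p.1 p.2 (pvNew data p.1 p.2)) i []).length
            = (PySem.List.pyGetD data i []).length := by
        intro i hi
        rw [pvSetCell, rowlen_set2 nd p.1 _ hp.1 (List.length_set) i hi, hrow i hi]
      rw [ih (fun q hq => hL q (List.mem_cons_of_mem _ hq)) _ hlen' hrow']
      rw [cell_setCell nd p.1 p.2 _ y' x' hp.1 hp.2.2.1 h0 h1 hyl hxl]
      by_cases hyx : y' = p.1 ∧ x' = p.2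
      · have hpe : (y', x') = p := by rw [hyx.1, hyx.2]
        have ht' : pvTrig data y' x' := by rw [hyx.1, hyx.2]; exact ht
        have hnv : pvNew data p.1 p.2 = pvNew data y' x' := by rw [hyx.1, hyx.2]
        by_cases hm : (y', x') ∈ L
        · rw [if_pos ⟨hm, ht'⟩, if_pos ⟨by rw [hpe]; exact List.mem_cons_self, ht'⟩]
        · rw [if_neg (fun h => hm h.1), if_pos hyx, hnv,
            if_pos ⟨by rw [hpe]; exact List.mem_cons_self, ht'⟩]
      · have hne : (y', x') ≠ p := fun h => hyx (by rw [← h]; exact ⟨rfl, rfl⟩)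
        by_cases hm : (y', x') ∈ L ∧ pvTrig data y' x'
        · rw [if_pos hm, if_pos ⟨List.mem_cons_of_mem _ hm.1, hm.2⟩]
        · rw [if_neg hm, if_neg hyx, if_neg (fun h : (y', x') ∈ p :: L ∧ _ => by
            rcases List.mem_cons.mp h.1 with he | hmem
            · exact hne he
            · exact hm ⟨hmem, h.2⟩)]
    · rw [if_neg ht]
      rw [ih (fun q hq => hL q (List.mem_cons_of_mem _ hq)) _ hlen hrow]
      by_cases hm : (y', x') ∈ L ∧ pvTrig data y' x'
      · rw [if_pos hm, if_pos ⟨List.mem_cons_of_mem _ hm.1, hm.2⟩]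
      · rw [if_neg hm, if_neg (fun h : (y', x') ∈ p :: L ∧ _ => by
          rcases List.mem_cons.mp h.1 with he | hmem
          · exact ht (by rw [← show (y', x') = p from he]; exact h.2)
          · exact hm ⟨hmem, h.2⟩)]

lemma foldA_shape (data : List (List String)) (L : List (Int × Int))
    (hL : ∀ p ∈ L, 0 ≤ p.1) (nd : List (List String)) :
    (L.foldl (fun nd p => pvStepA data nd p.1 p.2) nd).length = nd.length ∧
    ∀ i : Int, 0 ≤ i →
      (PySem.List.pyGetD (L.foldl (fun nd p => pvStepA data nd p.1 p.2) nd) i []).length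
        = (PySem.List.pyGetD nd i []).length := by
  induction L generalizing nd with
  | nil => exact ⟨rfl, fun _ _ => rfl⟩
  | cons p L ih =>
    rw [List.foldl_cons, stepA_eq]
    have hp := hL p List.mem_cons_self
    have ih' := ih (fun q hq => hL q (List.mem_cons_of_mem _ hq))
    by_cases ht : pvTrig data p.1 p.2
    · rw [if_pos ht]
      obtain ⟨e1, e2⟩ := ih' (pvSetCell nd p.1 p.2 (pvNew data p.1 p.2))
      refine ⟨by rw [e1, pvSetCell, List.length_set], fun i hi => ?_⟩
      rw [e2 i hi, pvSetCell, rowlen_set2 nd p.1 _ hp (List.length_set) i hi]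
    · rw [if_neg ht]
      exact ih' nd

-- B's scatter: the increment events of one source, then of all sources
def pvSrcP (data : List (List String)) (y' x' : Int) (p : Int × Int) : Bool :=
  decide (pvCell data p.1 p.2 = "#" ∧ max 0 (p.1 - 1) ≤ y' ∧ y' < min (pvH data) (p.1 + 2) ∧
          max 0 (p.2 - 1) ≤ x' ∧ x' < min (pvW data) (p.2 + 2) ∧ (y', x') ≠ (p.1, p.2))

lemma inc_shape (data : List (List String)) (g : List (List Int)) (y x : Int) (hy : 0 ≤ y)
    (hg1 : g.length = (pvH data).toNat)
    (hg2 : ∀ i : Int, 0 ≤ i → i.toNat < g.length → (PySem.List.pyGetD g i []).length = (pvW data).toNat) :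
    (pvInc g y x).length = (pvH data).toNat ∧
    ∀ i : Int, 0 ≤ i → i.toNat < (pvInc g y x).length →
      (PySem.List.pyGetD (pvInc g y x) i []).length = (pvW data).toNat := by
  constructor
  · rw [pvInc, List.length_set, hg1]
  · intro i hi hilt
    rw [pvInc, rowlen_set2 g y _ hy (List.length_set) i hi]
    rw [pvInc, List.length_set] at hilt
    exact hg2 i hi hilt

lemma foldInc (data : List (List String)) (src : Int × Int) (L : List (Int × Int))
    (hL : ∀ p ∈ L, 0 ≤ p.1 ∧ p.1 < pvH data ∧ 0 ≤ p.2 ∧ p.2 < pvW data)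
    (g : List (List Int)) (hg1 : g.length = (pvH data).toNat)
    (hg2 : ∀ i : Int, 0 ≤ i → i.toNat < g.length → (PySem.List.pyGetD g i []).length = (pvW data).toNat)
    (y' x' : Int) (hy' : 0 ≤ y') (hx' : 0 ≤ x') :
    pvCnt (L.foldl (fun g p => if (p.1, p.2) ≠ src then pvInc g p.1 p.2 else g) g) y' x' =
      pvCnt g y' x' + (L.countP (fun p => decide (p = (y', x') ∧ p ≠ src)) : Nat) := by
  induction L generalizing g with
  | nil => simp
  | cons p L ih =>
    have hp := hL p List.mem_cons_self
    have hyl : p.1.toNat < g.length := by rw [hg1]; omega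
    have hxl : p.2.toNat < (PySem.List.pyGetD g p.1 []).length := by
      rw [hg2 p.1 hp.1 hyl]; omega
    have htail := fun q hq => hL q (List.mem_cons_of_mem _ hq)
    rw [List.foldl_cons]
    by_cases hne : (p.1, p.2) ≠ src
    · rw [if_pos hne]
      have hne' : p ≠ src := by rwa [Prod.mk.eta] at hne
      obtain ⟨s1, s2⟩ := inc_shape data g p.1 p.2 hp.1 hg1 hg2
      rw [ih htail _ s1 s2]
      rw [cnt_inc g p.1 p.2 y' x' hp.1 hp.2.2.1 hy' hx' hyl hxl]
      simp only [List.countP_cons, decide_eq_true_eq]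
      by_cases hpy : y' = p.1 ∧ x' = p.2
      · have hpp : p = (y', x') := by
          cases p
          simp only [Prod.mk.injEq]
          exact ⟨hpy.1.symm, hpy.2.symm⟩
        rw [if_pos hpy, if_pos ⟨hpp, hne'⟩, hpy.1, hpy.2]
        push_cast
        omega
      · have hnp : ¬(p = (y', x') ∧ p ≠ src) := fun hh => hpy (by rw [hh.1]; exact ⟨rfl, rfl⟩)
        rw [if_neg hpy, if_neg hnp]
        push_cast
        omega
    · rw [if_neg hne]
      rw [ih htail _ hg1 hg2]
      have hps : p = src := by rw [← Prod.mk.eta (p := p)]; exact of_not_not hne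
      have hnp : ¬(p = (y', x') ∧ p ≠ src) := fun hh => hh.2 hps
      simp only [List.countP_cons, decide_eq_true_eq, if_neg hnp, Nat.add_zero]

lemma foldInc_shape (data : List (List String)) (src : Int × Int) (L : List (Int × Int))
    (hL : ∀ p ∈ L, 0 ≤ p.1) (g : List (List Int)) (hg1 : g.length = (pvH data).toNat)
    (hg2 : ∀ i : Int, 0 ≤ i → i.toNat < g.length → (PySem.List.pyGetD g i []).length = (pvW data).toNat) :
    (L.foldl (fun g p => if (p.1, p.2) ≠ src then pvInc g p.1 p.2 else g) g).length = (pvH data).toNat ∧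
    ∀ i : Int, 0 ≤ i → i.toNat < (L.foldl (fun g p => if (p.1, p.2) ≠ src then pvInc g p.1 p.2 else g) g).length →
      (PySem.List.pyGetD (L.foldl (fun g p => if (p.1, p.2) ≠ src then pvInc g p.1 p.2 else g) g) i []).length = (pvW data).toNat := by
  induction L generalizing g with
  | nil => exact ⟨hg1, hg2⟩
  | cons p L ih =>
    rw [List.foldl_cons]
    have htail := fun q hq => hL q (List.mem_cons_of_mem _ hq)
    by_cases hne : (p.1, p.2) ≠ src
    · rw [if_pos hne]
      obtain ⟨s1, s2⟩ := inc_shape data g p.1 p.2 (hL p List.mem_cons_self) hg1 hg2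
      exact ih htail _ s1 s2
    · rw [if_neg hne]
      exact ih htail _ hg1 hg2

-- B's scatter over a list of sources
lemma foldC (data : List (List String)) (L : List (Int × Int))
    (g : List (List Int)) (hg1 : g.length = (pvH data).toNat)
    (hg2 : ∀ i : Int, 0 ≤ i → i.toNat < g.length → (PySem.List.pyGetD g i []).length = (pvW data).toNat)
    (y' x' : Int) (hy' : 0 ≤ y') (hx' : 0 ≤ x') :
    pvCnt (L.foldl (fun g p =>
        if pvCell data p.1 p.2 = "#" then
          (PySem.List.pyRange (max 0 (p.1-1)) (min (pvH data) (p.1+2)) 1).foldl (fun g ny =>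
            (PySem.List.pyRange (max 0 (p.2-1)) (min (pvW data) (p.2+2)) 1).foldl (fun g nx =>
              if (ny, nx) ≠ (p.1, p.2) then pvInc g ny nx else g) g) g
        else g) g) y' x' =
      pvCnt g y' x' + (L.countP (pvSrcP data y' x') : Nat) := by
  induction L generalizing g with
  | nil => simp
  | cons p L ih =>
    rw [List.foldl_cons]
    by_cases hocc : pvCell data p.1 p.2 = "#"
    · rw [if_pos hocc]
      have hflat := foldl_foldl_flatMap
        (PySem.List.pyRange (max 0 (p.1-1)) (min (pvH data) (p.1+2)) 1)
        (fun ny => (PySem.List.pyRange (max 0 (p.2-1)) (min (pvW data) (p.2+2)) 1).map (fun nx => (ny, nx)))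
        (fun g q => if (q.1, q.2) ≠ (p.1, p.2) then pvInc g q.1 q.2 else g) g
      simp only [List.foldl_map] at hflat
      rw [hflat]
      rw [show List.flatMap
            (fun ny => List.map (fun nx => (ny, nx)) (PySem.List.pyRange (max 0 (p.2 - 1)) (min (pvW data) (p.2 + 2))))
            (PySem.List.pyRange (max 0 (p.1 - 1)) (min (pvH data) (p.1 + 2)))
          = pvPairs (max 0 (p.1-1)) (min (pvH data) (p.1+2)) (max 0 (p.2-1)) (min (pvW data) (p.2+2)) from rfl]
      have hWin : ∀ q ∈ pvPairs (max 0 (p.1-1)) (min (pvH data) (p.1+2)) (max 0 (p.2-1)) (min (pvW data) (p.2+2)),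
          0 ≤ q.1 ∧ q.1 < pvH data ∧ 0 ≤ q.2 ∧ q.2 < pvW data := by
        intro q hq
        rcases (mem_pvPairs _ _ _ _ q).mp hq with ⟨h1, h2, h3, h4⟩
        omega
      obtain ⟨sh1, sh2⟩ := foldInc_shape data (p.1, p.2)
        (pvPairs (max 0 (p.1-1)) (min (pvH data) (p.1+2)) (max 0 (p.2-1)) (min (pvW data) (p.2+2)))
        (fun q hq => (hWin q hq).1) g hg1 hg2
      rw [ih _ sh1 sh2]
      rw [foldInc data (p.1, p.2) _ hWin g hg1 hg2 y' x' hy' hx']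
      rw [countP_eq_count _ (y', x') (fun q => q ≠ (p.1, p.2))]
      have hmemW := mem_pvPairs (max 0 (p.1-1)) (min (pvH data) (p.1+2)) (max 0 (p.2-1)) (min (pvW data) (p.2+2)) (y', x')
      simp only [List.countP_cons]
      have hsrc : (pvSrcP data y' x' p = true) ↔
          (max 0 (p.1 - 1) ≤ y' ∧ y' < min (pvH data) (p.1 + 2) ∧
           max 0 (p.2 - 1) ≤ x' ∧ x' < min (pvW data) (p.2 + 2) ∧ (y', x') ≠ (p.1, p.2)) := by
        simp [pvSrcP, hocc]
      by_cases hne : (y', x') ≠ (p.1, p.2)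
      · by_cases hmem : (y', x') ∈ pvPairs (max 0 (p.1-1)) (min (pvH data) (p.1+2)) (max 0 (p.2-1)) (min (pvW data) (p.2+2))
        · rw [if_pos hne, countP_nodup_mem _ _ (nodup_pvPairs _ _ _ _), if_pos hmem]
          rcases hmemW.mp hmem with ⟨h1, h2, h3, h4⟩
          rw [if_pos (hsrc.mpr ⟨h1, h2, h3, h4, hne⟩)]
          push_cast
          omega
        · rw [if_pos hne, countP_nodup_mem _ _ (nodup_pvPairs _ _ _ _), if_neg hmem]
          rw [if_neg (fun hs => hmem (hmemW.mpr (by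
            rcases hsrc.mp hs with ⟨h1, h2, h3, h4, _⟩
            exact ⟨h1, h2, h3, h4⟩)))]
          push_cast
          omega
      · rw [if_neg hne]
        rw [if_neg (fun hs => hne (hsrc.mp hs).2.2.2.2)]
        push_cast
        omega
    · rw [if_neg hocc]
      rw [ih _ hg1 hg2]
      have hnp : pvSrcP data y' x' p = false := by
        simp [pvSrcP, hocc]
      simp only [List.countP_cons, hnp, Bool.false_eq_true, if_false, Nat.add_zero]

lemma mem_pvDirs (d : Int × Int) :
    d ∈ pvDirs ↔ (-1 ≤ d.1 ∧ d.1 ≤ 1 ∧ -1 ≤ d.2 ∧ d.2 ≤ 1 ∧ ¬(d.1 = 0 ∧ d.2 = 0)) := by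
  cases d
  simp only [pvDirs, List.mem_cons, List.not_mem_nil, or_false, Prod.mk.injEq]
  omega

-- the scatter/gather bridge: counting occupied sources that neighbor (y',x')
-- equals counting occupied cells in the 8 directions around (y',x')
lemma bridge (data : List (List String)) (y' x' : Int)
    (hy0 : 0 ≤ y') (hyh : y' < pvH data) (hx0 : 0 ≤ x') (hxw : x' < pvW data) :
    (pvPairs 0 (pvH data) 0 (pvW data)).countP (pvSrcP data y' x') =
      pvDirs.countP (fun d => pvOccB data (y' + d.2) (x' + d.1)) := by
  rw [List.countP_eq_length_filter, List.countP_eq_length_filter]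
  have hperm : ((pvPairs 0 (pvH data) 0 (pvW data)).filter (pvSrcP data y' x')).Perm
      ((pvDirs.filter (fun d => pvOccB data (y' + d.2) (x' + d.1))).map
        (fun d => (y' + d.2, x' + d.1))) := by
    have hnd1 : ((pvPairs 0 (pvH data) 0 (pvW data)).filter (pvSrcP data y' x')).Nodup :=
      (nodup_pvPairs _ _ _ _).filter _
    have hnd2 : ((pvDirs.filter (fun d => pvOccB data (y' + d.2) (x' + d.1))).map
        (fun d => (y' + d.2, x' + d.1))).Nodup := by
      apply List.Nodup.map_on
      · intro a _ b _ hab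
        rcases Prod.mk.injEq .. ▸ hab with h
        have h1 := congrArg Prod.fst hab
        have h2 := congrArg Prod.snd hab
        simp only at h1 h2
        cases a; cases b
        simp only [Prod.mk.injEq]
        constructor <;> omega
      · exact (by decide : pvDirs.Nodup).filter _
    rw [List.perm_ext_iff_of_nodup hnd1 hnd2]
    intro a
    simp only [List.mem_filter, List.mem_map, mem_pvPairs]
    constructor
    · rintro ⟨⟨hb1, hb2, hb3, hb4⟩, hs⟩
      have hs' := (by simpa [pvSrcP] using hs :
        pvCell data a.1 a.2 = "#" ∧ max 0 (a.1 - 1) ≤ y' ∧ y' < min (pvH data) (a.1 + 2) ∧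
        max 0 (a.2 - 1) ≤ x' ∧ x' < min (pvW data) (a.2 + 2) ∧ (y', x') ≠ (a.1, a.2))
      refine ⟨(a.2 - x', a.1 - y'), ⟨?_, ?_⟩, ?_⟩
      · rw [mem_pvDirs]
        simp only
        have hne := hs'.2.2.2.2.2
        have : ¬(a.1 = y' ∧ a.2 = x') := fun h => hne (by rw [h.1, h.2])
        constructor <;> [omega; constructor <;> [omega; constructor <;> [omega; constructor <;> [omega; omega]]]]
      · have e1 : y' + (a.1 - y') = a.1 := by omega
        have e2 : x' + (a.2 - x') = a.2 := by omega
        simp only [e1, e2, pvOccB]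
        simp [hs'.1]
        omega
      · have e1 : y' + (a.1 - y') = a.1 := by omega
        have e2 : x' + (a.2 - x') = a.2 := by omega
        simp only [e1, e2]
    · rintro ⟨d, hd, rfl⟩
      rcases hd with ⟨hdm, hocc⟩
      rw [mem_pvDirs] at hdm
      have hocc' := (by simpa [pvOccB] using hocc :
        (0 ≤ x' + d.1 ∧ x' + d.1 < pvW data ∧ 0 ≤ y' + d.2 ∧ y' + d.2 < pvH data) ∧
        pvCell data (y' + d.2) (x' + d.1) = "#")
      refine ⟨⟨by omega, by omega, by omega, by omega⟩, ?_⟩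
      simp only [pvSrcP, decide_eq_true_eq]
      refine ⟨hocc'.2, by omega, by omega, by omega, by omega, ?_⟩
      intro h
      have h1 := congrArg Prod.fst h
      have h2 := congrArg Prod.snd h
      simp only at h1 h2
      omega
  simpa using hperm.length_eq

lemma getD_set_one {α : Type} (r : List α) (n : Nat) (v d : α) (j : Nat) :
    (r.set n v).getD j d = if n = j ∧ n < r.length then v else r.getD j d := by
  simp only [List.getD_eq_getElem?_getD, List.getElem?_set]
  by_cases h1 : n = j
  · subst h1
    by_cases h2 : n < r.length
    · simp [h2]
    · simp [h2, List.getElem?_eq_none (by omega : r.length ≤ n)]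
  · simp [h1]

lemma ite_mem_cons {β : Type} (v1 v2 e : β) (PL PO : Prop) [Decidable PL] [Decidable PO]
    (hex : ¬(PL ∧ PO)) (mL ma : Prop) [Decidable mL] [Decidable ma] :
    (if mL ∧ PL then v1 else if mL ∧ PO then v2
     else if ma ∧ PL then v1 else if ma ∧ PO then v2 else e)
    = if (ma ∨ mL) ∧ PL then v1 else if (ma ∨ mL) ∧ PO then v2 else e := by
  by_cases h1 : PL <;> by_cases h2 : PO <;> by_cases h3 : mL <;> by_cases h4 : ma <;>
    simp_all

-- B's build pass, row characterized cell-wise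
lemma foldRow (data : List (List String)) (counts : List (List Int)) (y : Int)
    (L : List Int) (hL : ∀ x ∈ L, 0 ≤ x)
    (r : List String) (hlen : ∀ x ∈ L, x.toNat < r.length) (j : Nat) :
    ((L.foldl (fun r x =>
        if pvCell data y x = "L" ∧ pvCnt counts y x = 0 then r.set x.toNat "#"
        else if pvCell data y x = "#" ∧ 4 ≤ pvCnt counts y x then r.set x.toNat "L"
        else r) r)).getD j "" =
      if (j : Int) ∈ L ∧ pvCell data y (j : Int) = "L" ∧ pvCnt counts y (j : Int) = 0 then "#"
      else if (j : Int) ∈ L ∧ pvCell data y (j : Int) = "#" ∧ 4 ≤ pvCnt counts y (j : Int) then "L"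
      else r.getD j "" := by
  induction L generalizing r with
  | nil => simp
  | cons a L ih =>
    have ha := hL a List.mem_cons_self
    have haj := hlen a List.mem_cons_self
    have htail := fun q hq => hL q (List.mem_cons_of_mem _ hq)
    rw [List.foldl_cons]
    have hlen2 : ∀ q ∈ L, q.toNat <
        (if pvCell data y a = "L" ∧ pvCnt counts y a = 0 then r.set a.toNat "#"
         else if pvCell data y a = "#" ∧ 4 ≤ pvCnt counts y a then r.set a.toNat "L"
         else r).length := by
      intro q hq
      split_ifs <;> (try simp only [List.length_set]) <;> exact hlen q (List.mem_cons_of_mem _ hq)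
    have hstep : (if pvCell data y a = "L" ∧ pvCnt counts y a = 0 then r.set a.toNat "#"
         else if pvCell data y a = "#" ∧ 4 ≤ pvCnt counts y a then r.set a.toNat "L"
         else r).getD j ""
        = if (j : Int) = a ∧ pvCell data y (j : Int) = "L" ∧ pvCnt counts y (j : Int) = 0 then "#"
          else if (j : Int) = a ∧ pvCell data y (j : Int) = "#" ∧ 4 ≤ pvCnt counts y (j : Int) then "L"
          else r.getD j "" := by
      by_cases hja : (j : Int) = a
      · have hjn : a.toNat = j := by omega
        rw [hja]
        by_cases c1 : pvCell data y a = "L" ∧ pvCnt counts y a = 0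
        · rw [if_pos c1, if_pos ⟨rfl, c1⟩, getD_set_one, if_pos ⟨hjn, haj⟩]
        · rw [if_neg c1,
            if_neg (show ¬(a = a ∧ pvCell data y a = "L" ∧ pvCnt counts y a = 0) from fun h => c1 h.2)]
          by_cases c2 : pvCell data y a = "#" ∧ 4 ≤ pvCnt counts y a
          · rw [if_pos c2, if_pos ⟨rfl, c2⟩, getD_set_one, if_pos ⟨hjn, haj⟩]
          · rw [if_neg c2,
              if_neg (show ¬(a = a ∧ pvCell data y a = "#" ∧ 4 ≤ pvCnt counts y a) from fun h => c2 h.2)]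
      · have hjn : ¬ (a.toNat = j) := by omega
        rw [if_neg (show ¬((j : Int) = a ∧ pvCell data y (j : Int) = "L" ∧ pvCnt counts y (j : Int) = 0) from fun h => hja h.1)]
        rw [if_neg (show ¬((j : Int) = a ∧ pvCell data y (j : Int) = "#" ∧ 4 ≤ pvCnt counts y (j : Int)) from fun h => hja h.1)]
        split_ifs with c1 c2 <;>
          first
          | (rw [getD_set_one]; rw [if_neg (fun hh => hjn hh.1)])
          | rfl
    rw [ih htail _ hlen2, hstep]
    have hexcl : ¬ ((pvCell data y (j:Int) = "L" ∧ pvCnt counts y (j:Int) = 0) ∧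
        (pvCell data y (j:Int) = "#" ∧ 4 ≤ pvCnt counts y (j:Int))) := by
      rintro ⟨⟨h1, _⟩, ⟨h2, _⟩⟩
      rw [h1] at h2
      exact absurd h2 (by decide)
    simp only [List.mem_cons]
    exact ite_mem_cons "#" "L" (r.getD j "") _ _ hexcl ((j:Int) ∈ L) ((j:Int) = a)

lemma foldRow_len (data : List (List String)) (counts : List (List Int)) (y : Int)
    (L : List Int) (r : List String) :
    ((L.foldl (fun r x =>
        if pvCell data y x = "L" ∧ pvCnt counts y x = 0 then r.set x.toNat "#"
        else if pvCell data y x = "#" ∧ 4 ≤ pvCnt counts y x then r.set x.toNat "L"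
        else r) r)).length = r.length := by
  induction L generalizing r with
  | nil => rfl
  | cons a L ih =>
    rw [List.foldl_cons]
    split_ifs <;> rw [ih] <;> simp [List.length_set]

-- the scatter pass of B, named for the proofs
def pvCounts (data : List (List String)) : List (List Int) :=
  (PySem.List.pyRange 0 (pvH data) 1).foldl (fun g y =>
    (PySem.List.pyRange 0 (pvW data) 1).foldl (fun g x =>
      if pvCell data y x = "#" then
        (PySem.List.pyRange (max 0 (y-1)) (min (pvH data) (y+2)) 1).foldl (fun g ny =>
          (PySem.List.pyRange (max 0 (x-1)) (min (pvW data) (x+2)) 1).foldl (fun g nx =>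
            if (ny, nx) ≠ (y, x) then pvInc g ny nx else g) g) g
      else g) g)
    (List.replicate (pvH data).toNat (List.replicate (pvW data).toNat 0))

lemma counts0_len (data : List (List String)) :
    (List.replicate (pvH data).toNat (List.replicate (pvW data).toNat (0:Int))).length = (pvH data).toNat :=
  List.length_replicate

lemma counts0_row (data : List (List String)) : ∀ i : Int, 0 ≤ i →
    i.toNat < (List.replicate (pvH data).toNat (List.replicate (pvW data).toNat (0:Int))).length →
    (PySem.List.pyGetD (List.replicate (pvH data).toNat (List.replicate (pvW data).toNat (0:Int))) i []).length = (pvW data).toNat := by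
  intro i hi hilt
  obtain ⟨n, rfl⟩ : ∃ n : ℕ, i = (n : Int) := ⟨i.toNat, by omega⟩
  rw [List.length_replicate] at hilt
  simp only [PySem.List.pyGetD_natCast, Int.toNat_natCast] at *
  rw [List.getD_eq_getElem _ _ (by rw [List.length_replicate]; exact hilt)]
  simp

lemma counts0_cnt (data : List (List String)) (k j : Nat) :
    pvCnt (List.replicate (pvH data).toNat (List.replicate (pvW data).toNat 0)) (k:Int) (j:Int) = 0 := by
  rw [pvCnt]
  simp only [PySem.List.pyGetD_natCast]
  simp only [List.getD_eq_getElem?_getD, List.getElem?_replicate]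
  split_ifs <;> simp [List.getElem?_replicate] <;> split_ifs <;> rfl

lemma cnt_counts (data : List (List String)) (k j : Nat)
    (hk : (k:Int) < pvH data) (hj : (j:Int) < pvW data) :
    pvCnt (pvCounts data) (k:Int) (j:Int) = occA data (k:Int) (j:Int) := by
  have hflat := foldl_foldl_flatMap (PySem.List.pyRange 0 (pvH data) 1)
    (fun y => (PySem.List.pyRange 0 (pvW data) 1).map (fun x => (y, x)))
    (fun g (p : Int × Int) =>
      if pvCell data p.1 p.2 = "#" then
        (PySem.List.pyRange (max 0 (p.1-1)) (min (pvH data) (p.1+2)) 1).foldl (fun g ny =>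
          (PySem.List.pyRange (max 0 (p.2-1)) (min (pvW data) (p.2+2)) 1).foldl (fun g nx =>
            if (ny, nx) ≠ (p.1, p.2) then pvInc g ny nx else g) g) g
      else g)
    (List.replicate (pvH data).toNat (List.replicate (pvW data).toNat 0))
  simp only [List.foldl_map] at hflat
  have hC : pvCounts data = (pvPairs 0 (pvH data) 0 (pvW data)).foldl
      (fun g (p : Int × Int) =>
        if pvCell data p.1 p.2 = "#" then
          (PySem.List.pyRange (max 0 (p.1-1)) (min (pvH data) (p.1+2)) 1).foldl (fun g ny =>
            (PySem.List.pyRange (max 0 (p.2-1)) (min (pvW data) (p.2+2)) 1).foldl (fun g nx =>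
              if (ny, nx) ≠ (p.1, p.2) then pvInc g ny nx else g) g) g
        else g)
      (List.replicate (pvH data).toNat (List.replicate (pvW data).toNat 0)) := by
    unfold pvCounts
    exact hflat
  rw [hC, foldC data (pvPairs 0 (pvH data) 0 (pvW data)) _ (counts0_len data) (counts0_row data)
    (k:Int) (j:Int) (by positivity) (by positivity)]
  rw [counts0_cnt data k j, bridge data (k:Int) (j:Int) (by positivity) hk (by positivity) hj]
  rw [occA]
  omega

-- ===== VERDICT (by name: the statement is the Claim_ definition above) =====
theorem part_1_step_spec : Claim_equal_part_1_step := by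
  intro data _ hpre
  unfold Spec_part_1_step
  obtain ⟨hne, hrows⟩ := hpre
  -- A flattened over the grid positions
  have hA : part_1_step data = (pvPairs 0 (pvH data) 0 (pvW data)).foldl
      (fun nd p => pvStepA data nd p.1 p.2) data := by
    have hflat := foldl_foldl_flatMap (PySem.List.pyRange 0 (pvH data) 1)
      (fun y => (PySem.List.pyRange 0 (pvW data) 1).map (fun x => (y, x)))
      (fun nd (p : Int × Int) => pvStepA data nd p.1 p.2) data
    simp only [List.foldl_map] at hflat
    unfold part_1_step
    exact hflat
  -- grid positions are in range
  have hGL : ∀ p ∈ pvPairs 0 (pvH data) 0 (pvW data), 0 ≤ p.1 ∧ p.1.toNat < data.length ∧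
      0 ≤ p.2 ∧ p.2.toNat < (PySem.List.pyGetD data p.1 []).length := by
    intro p hp
    rcases (mem_pvPairs _ _ _ _ p).mp hp with ⟨h1, h2, h3, h4⟩
    unfold pvH at h2
    have hmem : PySem.List.pyGetD data p.1 [] ∈ data := by
      apply PySem.List.pyGetD_mem
      simp [PySem.Raise.InRange]
      omega
    have hle := hrows _ hmem
    unfold pvW at h4
    refine ⟨h1, by omega, h3, by omega⟩
  obtain ⟨hAlen, hArow⟩ := foldA_shape data (pvPairs 0 (pvH data) 0 (pvW data))
    (fun p hp => (hGL p hp).1) data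
  rw [← hA] at hAlen hArow
  -- B as a map of row builds
  have hB : part_1_step_alt data = (PySem.List.pyRange 0 (pvH data) 1).map (fun y =>
      (PySem.List.pyRange 0 (pvW data) 1).foldl (fun r x =>
        if pvCell data y x = "L" ∧ pvCnt (pvCounts data) y x = 0 then r.set x.toNat "#"
        else if pvCell data y x = "#" ∧ 4 ≤ pvCnt (pvCounts data) y x then r.set x.toNat "L"
        else r) (PySem.List.pyGetD data y [])) := by
    unfold part_1_step_alt
    exact (PySem.List.foldl_append_singleton_eq_map _ _ _).trans (List.nil_append _)
  rw [hB]
  have hHnat : (pvH data).toNat = data.length := by unfold pvH; omega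
  have hlenB : ((PySem.List.pyRange 0 (pvH data) 1).length) = data.length := by
    rw [PySem.List.length_pyRange_one]
    omega
  apply List.ext_getElem (by rw [List.length_map, hlenB, hAlen])
  intro k hk1 hk2
  have hkd : k < data.length := by rw [hAlen] at hk1; exact hk1
  have hkh : (k:Int) < pvH data := by unfold pvH; omega
  rw [List.getElem_map, PySem.List.getElem_pyRange_one _ _ _ (by rw [hlenB]; exact hkd), zero_add]
  -- row lengths
  have hrowlen : (PySem.List.pyGetD data (k:Int) []).length = data[k].length := by
    rw [PySem.List.pyGetD_natCast, List.getD_eq_getElem _ _ hkd]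
  have hwle : (pvW data) ≤ (data[k].length : Int) := by
    have := hrows data[k] (List.getElem_mem hkd)
    unfold pvW
    omega
  have hxmem : ∀ x ∈ PySem.List.pyRange 0 (pvW data) 1, 0 ≤ x := by
    intro x hx
    exact ((PySem.List.mem_pyRange_one).mp hx).1
  have hxlen : ∀ x ∈ PySem.List.pyRange 0 (pvW data) 1,
      x.toNat < (PySem.List.pyGetD data (k:Int) []).length := by
    intro x hx
    rcases (PySem.List.mem_pyRange_one).mp hx with ⟨hx1, hx2⟩
    rw [hrowlen]
    omega
  apply List.ext_getElem
  · rw [foldRow_len, hrowlen]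
    have h1 : (part_1_step data)[k] = (part_1_step data).getD k [] :=
      (List.getD_eq_getElem _ _ hk1).symm
    rw [h1, ← PySem.List.pyGetD_natCast (part_1_step data) k ([] : List String),
      hArow (k:Int) (by positivity), hrowlen]
  intro j hj1 hj2
  -- LHS cell
  have hjA : (part_1_step data)[k][j] = pvCell (part_1_step data) (k:Int) (j:Int) := by
    rw [pvCell]
    simp only [PySem.List.pyGetD_natCast]
    rw [List.getD_eq_getElem _ _ hk1, List.getD_eq_getElem _ _ hj1]
  have hjdlen : j < data[k].length := by
    have h1 : (part_1_step data)[k] = (part_1_step data).getD k [] :=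
      (List.getD_eq_getElem _ _ hk1).symm
    rw [h1, ← PySem.List.pyGetD_natCast (part_1_step data) k ([] : List String)] at hj1
    rw [hArow (k:Int) (by positivity), hrowlen] at hj1
    exact hj1
  rw [hjA, hA, foldA data _ hGL data rfl (fun _ _ => rfl) (k:Int) (j:Int) (by positivity) (by positivity)]
  -- RHS cell
  have hjB : ((PySem.List.pyRange 0 (pvW data) 1).foldl (fun r x =>
        if pvCell data (k:Int) x = "L" ∧ pvCnt (pvCounts data) (k:Int) x = 0 then r.set x.toNat "#"
        else if pvCell data (k:Int) x = "#" ∧ 4 ≤ pvCnt (pvCounts data) (k:Int) x then r.set x.toNat "L"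
        else r) (PySem.List.pyGetD data (k:Int) []))[j]
      = ((PySem.List.pyRange 0 (pvW data) 1).foldl (fun r x =>
        if pvCell data (k:Int) x = "L" ∧ pvCnt (pvCounts data) (k:Int) x = 0 then r.set x.toNat "#"
        else if pvCell data (k:Int) x = "#" ∧ 4 ≤ pvCnt (pvCounts data) (k:Int) x then r.set x.toNat "L"
        else r) (PySem.List.pyGetD data (k:Int) [])).getD j "" :=
    (List.getD_eq_getElem _ _ hj2).symm
  rw [hjB, foldRow data (pvCounts data) (k:Int) _ hxmem _ hxlen j]
  have hmem_iff : ((j:Int) ∈ PySem.List.pyRange 0 (pvW data) 1) ↔ ((j:Int) < pvW data) := by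
    rw [PySem.List.mem_pyRange_one]
    omega
  have hcellD : (PySem.List.pyGetD data (k:Int) []).getD j "" = pvCell data (k:Int) (j:Int) := by
    rw [pvCell]
    simp only [PySem.List.pyGetD_natCast]
  by_cases hjw : (j:Int) < pvW data
  · have hjm : (j:Int) ∈ PySem.List.pyRange 0 (pvW data) 1 := hmem_iff.mpr hjw
    have hgm : ((k:Int), (j:Int)) ∈ pvPairs 0 (pvH data) 0 (pvW data) :=
      (mem_pvPairs _ _ _ _ _).mpr ⟨by positivity, hkh, by positivity, hjw⟩
    have hcnt := cnt_counts data k j hkh hjw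
    by_cases hcl : pvCell data (k:Int) (j:Int) = "L" ∧ occA data (k:Int) (j:Int) = 0
    · rw [if_pos ⟨hgm, Or.inl hcl⟩, if_pos ⟨hjm, hcl.1, by rw [hcnt]; exact hcl.2⟩]
      rw [pvNew, if_pos hcl.1]
    · by_cases hco : pvCell data (k:Int) (j:Int) = "#" ∧ 4 ≤ occA data (k:Int) (j:Int)
      · rw [if_pos ⟨hgm, Or.inr hco⟩,
          if_neg (fun h => hcl ⟨h.2.1, by rw [← hcnt]; exact h.2.2⟩),
          if_pos ⟨hjm, hco.1, by rw [hcnt]; exact hco.2⟩]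
        rw [pvNew, if_neg (fun h => by rw [h] at hco; exact absurd hco.1 (by decide))]
      · rw [if_neg (fun h => by
            rcases h.2 with h' | h'
            · exact hcl h'
            · exact hco h'),
          if_neg (fun h => hcl ⟨h.2.1, by rw [← hcnt]; exact h.2.2⟩),
          if_neg (fun h => hco ⟨h.2.1, by rw [← hcnt]; exact h.2.2⟩), hcellD]
  · have hgnm : ¬ (((k:Int), (j:Int)) ∈ pvPairs 0 (pvH data) 0 (pvW data)) := fun h =>
      hjw ((mem_pvPairs _ _ _ _ _).mp h).2.2.2
    rw [if_neg (fun h => hgnm h.1),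
      if_neg (fun h => hjw (hmem_iff.mp h.1)),
      if_neg (fun h => hjw (hmem_iff.mp h.1)), hcellD]
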